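-- pv_equiv track=rewrite | github.com/victorlee079/leetcode | oa/storageoptimization.py | storage_optimization
-- ===== SOURCE A (Python) =====
-- def storage_optimization(n, m, h, v):
--     max_h = max_v = 0
--
--     prev = 0
--     for i in range(1, n+2):
--         max_h = max(max_h, i - prev)
--         if i not in h:
--             prev = i
--
--     prev = 0
--     for i in range(1, m+2):
--         max_v = max(max_v, i - prev)
--         if i not in v:
--             prev = i
--
--     return max_h * max_v
-- ===== SOURCE B (Python) =====
-- def storage_optimization(n, m, h, v):
--     def axis(size, cuts):
--         # longest run of consecutive cut positions inside [1, size], scanned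
--         # over the sorted deduplicated cuts instead of over every position
--         if size < 0:
--             return 0
--         best = cur = 0
--         prev = None
--         for c in sorted(set(x for x in cuts if 1 <= x <= size)):
--             cur = cur + 1 if c - 1 == prev else 1
--             if cur > best:
--                 best = cur
--             prev = c
--         return best + 1
--     return axis(n, h) * axis(m, v)
-- ===== Notes on version B (the rewrite author's own statement) =====
-- stated objective: alternative
-- what changed: Instead of walking every position 1..n+1 (and 1..m+1) with a membership test on the cut list at each step, B filters the cuts to range, deduplicates and sorts them, and scans the sorted cuts once tracking the longest run of consecutive values; the answer per axis is longest run + 1 (0 for negative size).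
import Mathlib
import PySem

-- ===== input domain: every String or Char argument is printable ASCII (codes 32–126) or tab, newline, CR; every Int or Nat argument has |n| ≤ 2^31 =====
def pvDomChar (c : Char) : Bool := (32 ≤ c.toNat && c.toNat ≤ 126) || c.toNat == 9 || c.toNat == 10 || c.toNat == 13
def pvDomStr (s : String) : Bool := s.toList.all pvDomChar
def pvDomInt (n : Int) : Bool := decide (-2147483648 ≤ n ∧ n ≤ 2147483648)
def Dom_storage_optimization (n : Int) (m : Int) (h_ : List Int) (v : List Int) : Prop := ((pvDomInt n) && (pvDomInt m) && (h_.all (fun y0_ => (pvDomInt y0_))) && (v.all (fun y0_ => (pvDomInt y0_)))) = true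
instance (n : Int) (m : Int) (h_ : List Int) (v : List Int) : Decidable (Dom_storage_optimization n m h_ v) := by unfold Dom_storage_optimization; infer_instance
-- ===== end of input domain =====

-- B replaces A's position-by-position walk (with a membership test at every grid
-- index) by a single sorted scan of the deduplicated in-range cuts per axis.

-- ===== PORT A =====
-- for i in range(1, n+2): max_h = max(max_h, i - prev); if i not in h: prev = i
def storage_optimization (n : Int) (m : Int) (h_ : List Int) (v : List Int) : Int :=
  let stH := (PySem.List.pyRange 1 (n + 2) 1).foldl
    (fun (acc : Int × Int) i =>
      (max acc.1 (i - acc.2), if i ∈ h_ then acc.2 else i)) (0, 0)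
  let stV := (PySem.List.pyRange 1 (m + 2) 1).foldl
    (fun (acc : Int × Int) i =>
      (max acc.1 (i - acc.2), if i ∈ v then acc.2 else i)) (0, 0)
  stH.1 * stV.1

-- ===== PORT B =====
-- axis(size, cuts) from Source B: scan sorted(set(in-range cuts)), tracking the
-- current run of consecutive values (cur) and the best run (best); state is
-- (best, cur, prev) with prev : Option Int for Python's None.
def pvAxisAlt (size : Int) (cuts : List Int) : Int :=
  if size < 0 then 0
  else
    let st := (PySem.List.sorted
        (PySem.Set.ofList (cuts.filter (fun x => decide (1 ≤ x ∧ x ≤ size))))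
        (fun x => x) false).foldl
      (fun (acc : Int × Int × Option Int) c =>
        let cur := if some (c - 1) == acc.2.2 then acc.2.1 + 1 else 1
        (if cur > acc.1 then cur else acc.1, cur, some c)) (0, 0, none)
    st.1 + 1

def storage_optimization_alt (n : Int) (m : Int) (h_ : List Int) (v : List Int) : Int :=
  pvAxisAlt n h_ * pvAxisAlt m v

-- ===== PRECONDITION & SPEC =====
def Spec_storage_optimization (n : Int) (m : Int) (h_ : List Int) (v : List Int) (out : Int) : Prop := out = storage_optimization_alt n m h_ v
instance (n : Int) (m : Int) (h_ : List Int) (v : List Int) (out : Int) : Decidable (Spec_storage_optimization n m h_ v out) := by unfold Spec_storage_optimization; infer_instance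

-- ===== CLAIM (what is proved, stated in full; the proofs are below) =====
def Claim_equal_storage_optimization : Prop := ∀ (n : Int) (m : Int) (h_ : List Int) (v : List Int), Dom_storage_optimization n m h_ v → Spec_storage_optimization n m h_ v (storage_optimization n m h_ v)

-- ===== LEMMAS AND PROOFS =====

-- pvRun h k = length of the maximal run of cuts (elements of h) ending at position k
def pvRun (h : List Int) : Nat → Int
  | 0 => 0
  | k + 1 => if ((k : Int) + 1) ∈ h then pvRun h k + 1 else 0

-- pvM h N = max of pvRun h j over j < N
def pvM (h : List Int) : Nat → Int
  | 0 => 0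
  | k + 1 => max (pvM h k) (pvRun h k)

theorem pvRun_nonneg (h : List Int) (k : Nat) : 0 ≤ pvRun h k := by
  induction k with
  | zero => simp [pvRun]
  | succ k ih => simp only [pvRun]; split <;> omega

theorem pvM_nonneg (h : List Int) (k : Nat) : 0 ≤ pvM h k := by
  induction k with
  | zero => simp [pvM]
  | succ k ih => simp only [pvM]; have := pvRun_nonneg h k; omega

theorem pvRun_eq_zero (h : List Int) (k : Nat)
    (hk : ¬(0 < k ∧ (k : Int) ∈ h)) : pvRun h k = 0 := by
  cases k with
  | zero => rfl
  | succ k =>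
    have : ¬ ((k : Int) + 1) ∈ h := by
      intro hc; exact hk ⟨Nat.succ_pos k, by push_cast; exact hc⟩
    simp [pvRun, this]

-- A's loop, characterised: after i = 1 .. N the state is (1 + max run, N - run N)
theorem pvA_loop (h : List Int) (N : Nat) :
    (PySem.List.pyRange 1 ((N : Int) + 1) 1).foldl
      (fun (acc : Int × Int) i =>
        (max acc.1 (i - acc.2), if i ∈ h then acc.2 else i)) (0, 0)
    = ((if N = 0 then 0 else 1 + pvM h N), (N : Int) - pvRun h N) := by
  induction N with
  | zero => simp [PySem.List.pyRange_one_eq_nil, pvRun]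
  | succ N ih =>
    have hsplit : PySem.List.pyRange 1 (((N + 1 : Nat) : Int) + 1) 1
        = PySem.List.pyRange 1 ((N : Int) + 1) 1 ++ [(N : Int) + 1] := by
      push_cast
      exact PySem.List.pyRange_one_succ_right (by omega)
    rw [hsplit, List.foldl_append, ih]
    simp only [List.foldl_cons, List.foldl_nil, Prod.mk.injEq]
    have hrun := pvRun_nonneg h N
    have hM := pvM_nonneg h N
    have hM1 : pvM h (N + 1) = max (pvM h N) (pvRun h N) := rfl
    by_cases hc : ((N : Int) + 1) ∈ h
    · have hrun1 : pvRun h (N + 1) = pvRun h N + 1 := by simp [pvRun, hc]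
      refine ⟨?_, ?_⟩
      · cases N with
        | zero => simp [pvRun, pvM] at *; try omega
        | succ K =>
          simp only [if_neg (Nat.succ_ne_zero K), if_neg (Nat.succ_ne_zero (K + 1)), hM1]
          omega
      · simp only [if_pos hc, hrun1]; push_cast; ring
    · have hrun0 : pvRun h (N + 1) = 0 := by simp [pvRun, hc]
      refine ⟨?_, ?_⟩
      · cases N with
        | zero => simp [pvRun, pvM] at *; try omega
        | succ K =>
          simp only [if_neg (Nat.succ_ne_zero K), if_neg (Nat.succ_ne_zero (K + 1)), hM1]
          omega
      · simp only [if_neg hc, hrun0]; push_cast; ring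

-- the sorted deduplicated list of in-range cuts for bound k
def pvL (h : List Int) (k : Nat) : List Int :=
  PySem.List.sorted
    (PySem.Set.ofList (h.filter (fun x => decide (1 ≤ x ∧ x ≤ (k : Int)))))
    (fun x => x) false

theorem mem_pvL (h : List Int) (k : Nat) (x : Int) :
    x ∈ pvL h k ↔ x ∈ h ∧ 1 ≤ x ∧ x ≤ (k : Int) := by
  unfold pvL
  rw [PySem.List.mem_sorted, PySem.Set.mem_ofList, List.mem_filter]
  simp

theorem pairwise_pvL (h : List Int) (k : Nat) : (pvL h k).Pairwise (· < ·) :=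
  PySem.List.sorted_ofList_pairwise_lt _

theorem nodup_pvL (h : List Int) (k : Nat) : (pvL h k).Nodup :=
  (pairwise_pvL h k).imp ne_of_lt

theorem pvL_zero (h : List Int) : pvL h 0 = [] := by
  apply List.eq_nil_iff_forall_not_mem.mpr
  intro x hx
  have := (mem_pvL h 0 x).mp hx
  omega

theorem pvL_succ (h : List Int) (k : Nat) :
    pvL h (k + 1) = if ((k : Int) + 1) ∈ h then pvL h k ++ [(k : Int) + 1]
                    else pvL h k := by
  by_cases hc : ((k : Int) + 1) ∈ h
  · rw [if_pos hc]
    apply PySem.List.sorted_eq_of_perm_of_pairwise_lt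
    · have hnd2 : (PySem.Set.ofList
          (h.filter (fun x => decide (1 ≤ x ∧ x ≤ ((k + 1 : Nat) : Int))))).Nodup :=
        PySem.Set.nodup_ofList _
      have hnotmem : ((k : Int) + 1) ∉ pvL h k := by
        intro hx; have := (mem_pvL h k _).mp hx; omega
      have hnd1 : (pvL h k ++ [(k : Int) + 1]).Nodup := by
        rw [List.nodup_append]
        exact ⟨nodup_pvL h k, List.nodup_singleton _,
          by
            intro a ha b hb
            rw [List.mem_singleton] at hb
            subst hb
            exact fun he => hnotmem (he ▸ ha)⟩
      refine (List.perm_ext_iff_of_nodup hnd1 hnd2).mpr ?_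
      intro a
      rw [PySem.Set.mem_ofList, List.mem_filter, List.mem_append,
          List.mem_singleton, mem_pvL]
      constructor
      · rintro (⟨ha, h1, h2⟩ | rfl)
        · exact ⟨ha, by simp only [decide_eq_true_eq]; push_cast; omega⟩
        · exact ⟨hc, by simp only [decide_eq_true_eq]; push_cast; omega⟩
      · rintro ⟨ha, hd⟩
        simp only [decide_eq_true_eq] at hd
        push_cast at hd
        by_cases he : a = (k : Int) + 1
        · exact Or.inr he
        · exact Or.inl ⟨ha, hd.1, by omega⟩
    · rw [List.pairwise_append]
      refine ⟨pairwise_pvL h k, List.pairwise_singleton _ _, ?_⟩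
      intro a ha b hb
      rw [List.mem_singleton] at hb
      subst hb
      have := (mem_pvL h k a).mp ha
      omega
  · rw [if_neg hc]
    apply PySem.List.sorted_eq_of_perm_of_pairwise_lt
    · have hnd2 : (PySem.Set.ofList
          (h.filter (fun x => decide (1 ≤ x ∧ x ≤ ((k + 1 : Nat) : Int))))).Nodup :=
        PySem.Set.nodup_ofList _
      refine (List.perm_ext_iff_of_nodup (nodup_pvL h k) hnd2).mpr ?_
      intro a
      rw [PySem.Set.mem_ofList, List.mem_filter, mem_pvL]
      constructor
      · rintro ⟨ha, h1, h2⟩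
        exact ⟨ha, by simp only [decide_eq_true_eq]; push_cast; omega⟩
      · rintro ⟨ha, hd⟩
        simp only [decide_eq_true_eq] at hd
        push_cast at hd
        refine ⟨ha, hd.1, ?_⟩
        by_cases he : a = (k : Int) + 1
        · exact absurd (he ▸ ha) hc
        · omega
    · exact pairwise_pvL h k

-- B's scan state over pvL h k
def pvGB (h : List Int) (k : Nat) : Int × Int × Option Int :=
  (pvL h k).foldl
    (fun (acc : Int × Int × Option Int) c =>
      let cur := if some (c - 1) == acc.2.2 then acc.2.1 + 1 else 1
      (if cur > acc.1 then cur else acc.1, cur, some c)) (0, 0, none)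

theorem pvB_loop (h : List Int) (k : Nat) :
    (pvGB h k).1 = pvM h (k + 1)
    ∧ (∀ j : Int, (pvGB h k).2.2 = some j → 1 ≤ j ∧ j ≤ (k : Int) ∧ j ∈ h)
    ∧ ((0 < k ∧ (k : Int) ∈ h) →
        (pvGB h k).2.1 = pvRun h k ∧ (pvGB h k).2.2 = some (k : Int)) := by
  induction k with
  | zero =>
    refine ⟨?_, ?_, ?_⟩
    · simp [pvGB, pvL_zero, pvM, pvRun]
    · intro j hj; simp [pvGB, pvL_zero] at hj
    · intro hk; exact absurd hk.1 (lt_irrefl 0)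
  | succ k ih =>
    obtain ⟨ihb, ihp, ihr⟩ := ih
    have hGB : pvGB h (k + 1)
        = if ((k : Int) + 1) ∈ h then
            (let acc := pvGB h k
             let cur := if some (((k : Int) + 1) - 1) == acc.2.2 then acc.2.1 + 1 else 1
             (if cur > acc.1 then cur else acc.1, cur, some ((k : Int) + 1)))
          else pvGB h k := by
      unfold pvGB
      rw [pvL_succ]
      by_cases hc : ((k : Int) + 1) ∈ h
      · rw [if_pos hc, if_pos hc, List.foldl_append, List.foldl_cons, List.foldl_nil]
      · rw [if_neg hc, if_neg hc]
    by_cases hc : ((k : Int) + 1) ∈ h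
    · -- position k+1 is a cut: one more scan step
      rw [hGB, if_pos hc]
      simp only
      have hkk : ((k : Int) + 1) - 1 = (k : Int) := by ring
      rw [hkk]
      have hrun1 : pvRun h (k + 1) = pvRun h k + 1 := by simp [pvRun, hc]
      have hcur : (if some (k : Int) == (pvGB h k).2.2 then (pvGB h k).2.1 + 1 else 1)
          = pvRun h (k + 1) := by
        by_cases hp : (pvGB h k).2.2 = some (k : Int)
        · have hjk := ihp (k : Int) hp
          have hk0 : 0 < k := by omega
          have hr := ihr ⟨hk0, hjk.2.2⟩
          rw [hp, hrun1]
          simp [hr.1]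
        · have hz : pvRun h k = 0 := by
            apply pvRun_eq_zero
            rintro ⟨hk0, hck⟩
            exact hp (ihr ⟨hk0, hck⟩).2
          have hfalse : (some (k : Int) == (pvGB h k).2.2) = false := by
            cases hq : (pvGB h k).2.2 with
            | none => rfl
            | some j =>
              simp only [beq_eq_false_iff_ne, ne_eq, Option.some.injEq]
              intro he; exact hp (hq.trans (by rw [he]))
          rw [hfalse]
          simp [hrun1, hz]
      rw [hcur]
      refine ⟨?_, ?_, ?_⟩
      · rw [ihb]
        have h1 := pvM_nonneg h (k + 1)
        have h2 := pvRun_nonneg h (k + 1)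
        show (if pvRun h (k + 1) > pvM h (k + 1) then pvRun h (k + 1) else pvM h (k + 1))
            = pvM h (k + 1 + 1)
        rw [show pvM h (k + 1 + 1) = max (pvM h (k + 1)) (pvRun h (k + 1)) from rfl]
        omega
      · intro j hj
        simp only [Option.some.injEq] at hj
        subst hj
        push_cast
        exact ⟨by omega, by omega, hc⟩
      · intro _
        refine ⟨rfl, by push_cast; rfl⟩
    · -- position k+1 is not a cut: state unchanged
      rw [hGB, if_neg hc]
      have hrun0 : pvRun h (k + 1) = 0 := by simp [pvRun, hc]
      refine ⟨?_, ?_, ?_⟩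
      · rw [ihb,
          show pvM h (k + 1 + 1) = max (pvM h (k + 1)) (pvRun h (k + 1)) from rfl,
          hrun0]
        have := pvM_nonneg h (k + 1)
        omega
      · intro j hj
        have := ihp j hj
        push_cast
        exact ⟨this.1, by omega, this.2.2⟩
      · rintro ⟨_, hck⟩
        exact absurd (by exact_mod_cast hck) hc

-- per-axis equality: A's position walk = B's sorted-cut scan
theorem pvAxis_eq (size : Int) (h : List Int) :
    ((PySem.List.pyRange 1 (size + 2) 1).foldl
      (fun (acc : Int × Int) i =>
        (max acc.1 (i - acc.2), if i ∈ h then acc.2 else i)) (0, 0)).1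
    = pvAxisAlt size h := by
  by_cases hneg : size < 0
  · rw [PySem.List.pyRange_one_eq_nil (by omega)]
    simp [pvAxisAlt, hneg]
  · have hsize : size = ((size.toNat : Nat) : Int) := by omega
    have hb : size + 2 = ((size.toNat + 1 : Nat) : Int) + 1 := by push_cast; omega
    rw [hb, pvA_loop h (size.toNat + 1)]
    rw [if_neg (Nat.succ_ne_zero _)]
    unfold pvAxisAlt
    rw [if_neg (by omega)]
    have hL : (PySem.List.sorted
        (PySem.Set.ofList (h.filter (fun x => decide (1 ≤ x ∧ x ≤ size))))
        (fun x => x) false) = pvL h size.toNat := by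
      unfold pvL
      rw [← hsize]
    simp only [hL]
    have hbest := (pvB_loop h size.toNat).1
    show 1 + pvM h (size.toNat + 1) = (pvGB h size.toNat).1 + 1
    rw [hbest]
    ring

-- ===== VERDICT (by name: the statement is the Claim_ definition above) =====
theorem storage_optimization_spec : Claim_equal_storage_optimization := by
  intro n m h_ v _
  unfold Spec_storage_optimization storage_optimization storage_optimization_alt
  simp only
  rw [pvAxis_eq n h_, pvAxis_eq m v]
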